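-- pv_equiv track=rewrite | github.com/Patrick-Bender/wholesearchcatalog.com | webCrawler/webCrawler/spiders/alternet_spider.py | isUrlBanned
-- ===== SOURCE A (Python) =====
-- def isUrlBanned(link, bannedUrl):
--     workingLink = link
--     for urlPart in bannedUrl:
--         endIndex = workingLink.find(urlPart)
--         if endIndex == -1:
--             return False
--         else:
--             workingLink = workingLink[endIndex+len(urlPart):]
--     return True
-- ===== SOURCE B (Python) =====
-- def isUrlBanned(link, bannedUrl):
--     # Right-to-left greedy: walk the banned parts in REVERSE order, matching
--     # each at its RIGHTMOST occurrence strictly before the previously matched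
--     # part's start.  An in-order occurrence sequence exists iff the rightmost
--     # greedy one does, so this agrees with the leftmost scan.
--     end = len(link)
--     for part in reversed(bannedUrl):
--         j = link.rfind(part, 0, end)
--         if j == -1:
--             return False
--         end = j
--     return True
-- ===== Notes on version B (the rewrite author's own statement) =====
-- stated objective: alternative
-- what changed: B matches the banned parts in reverse order from the right end of the link using rfind with a shrinking integer end bound (rightmost-greedy), instead of A's left-to-right find-and-slice (leftmost-greedy); both succeed exactly when some in-order occurrence sequence exists.
import Mathlib
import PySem

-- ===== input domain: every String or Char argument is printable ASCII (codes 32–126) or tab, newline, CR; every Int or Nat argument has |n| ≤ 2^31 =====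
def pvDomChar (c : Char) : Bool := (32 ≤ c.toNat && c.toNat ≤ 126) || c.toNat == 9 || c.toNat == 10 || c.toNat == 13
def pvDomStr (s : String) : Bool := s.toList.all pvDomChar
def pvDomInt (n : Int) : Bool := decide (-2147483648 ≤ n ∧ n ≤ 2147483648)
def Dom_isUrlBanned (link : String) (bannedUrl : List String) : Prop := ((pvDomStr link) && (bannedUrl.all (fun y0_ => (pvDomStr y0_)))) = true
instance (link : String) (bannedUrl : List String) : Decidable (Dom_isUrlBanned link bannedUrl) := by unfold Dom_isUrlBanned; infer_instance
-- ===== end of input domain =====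

-- B matches the banned parts in reverse order from the right end via rfind with a
-- shrinking end bound (rightmost-greedy), instead of A's left-to-right find-and-slice
-- (leftmost-greedy); alternative algorithm, same cost.

-- ===== PORT A =====
-- the for-loop with early return, as recursion over bannedUrl carrying workingLink
def isUrlBannedGo (workingLink : String) (parts : List String) : Bool :=
  match parts with
  | [] => true
  | urlPart :: rest =>
    let endIndex := PySem.Str.find workingLink urlPart
    if endIndex = -1 then false
    else isUrlBannedGo (PySem.Str.slice workingLink (some (endIndex + (PySem.Str.len urlPart : Int))) none) rest

def isUrlBanned (link : String) (bannedUrl : List String) : Bool :=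
  isUrlBannedGo link bannedUrl

-- ===== PORT B =====
-- Source B's loop over reversed(bannedUrl), carrying the shrinking end bound
def isUrlBannedAltGo (link : String) (parts : List String) (e : Int) : Bool :=
  match parts with
  | [] => true
  | p :: rest =>
    let j := PySem.Str.rfindFrom link p 0 (some e)
    if j = -1 then false else isUrlBannedAltGo link rest j

def isUrlBanned_alt (link : String) (bannedUrl : List String) : Bool :=
  isUrlBannedAltGo link bannedUrl.reverse (PySem.Str.len link)

-- ===== PRECONDITION & SPEC =====
def Spec_isUrlBanned (link : String) (bannedUrl : List String) (out : Bool) : Prop := out = isUrlBanned_alt link bannedUrl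
instance (link : String) (bannedUrl : List String) (out : Bool) : Decidable (Spec_isUrlBanned link bannedUrl out) := by unfold Spec_isUrlBanned; infer_instance

-- ===== CLAIM (what is proved, stated in full; the proofs are below) =====
def Claim_equal_isUrlBanned : Prop := ∀ (link : String) (bannedUrl : List String), Dom_isUrlBanned link bannedUrl → Spec_isUrlBanned link bannedUrl (isUrlBanned link bannedUrl)

-- ===== LEMMAS AND PROOFS =====

-- "the parts occur in s, in order, head first (leftmost reading)"
def MatchP : List Char → List String → Prop
  | _, [] => True
  | s, p :: rest => ∃ i : Nat, p.toList <+: s.drop i ∧ MatchP (s.drop (i + p.toList.length)) rest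

-- "the parts occur in s, head LAST (rightmost reading): head at j, the rest before j"
def MB : List Char → List String → Prop
  | _, [] => True
  | s, p :: rest => ∃ j : Nat, p.toList <+: s.drop j ∧ MB (s.take j) rest

theorem matchP_cons_char (c : Char) (t : List Char) (l : List String)
    (h : MatchP t l) : MatchP (c :: t) l := by
  induction l generalizing t with
  | nil => trivial
  | cons p rest ih =>
    obtain ⟨i, hp, hm⟩ := h
    refine ⟨i + 1, by simpa using hp, ?_⟩
    have he : i + 1 + p.toList.length = (i + p.toList.length) + 1 := by omega
    rw [he, List.drop_succ_cons]
    exact hm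

theorem matchP_suffix {t u : List Char} (l : List String)
    (h : t <:+ u) (hm : MatchP t l) : MatchP u l := by
  obtain ⟨v, rfl⟩ := h
  induction v with
  | nil => simpa using hm
  | cons c v ih => exact matchP_cons_char c _ l ih

theorem matchP_drop_le {s : List Char} {l : List String} {i j : Nat}
    (hij : i ≤ j) (h : MatchP (s.drop j) l) : MatchP (s.drop i) l := by
  refine matchP_suffix l ?_ h
  have : s.drop j = (s.drop i).drop (j - i) := by
    rw [List.drop_drop]; congr 1; omega
  rw [this]; exact List.drop_suffix _ _

theorem mb_mono {t u : List Char} (l : List String)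
    (h : t <+: u) (hm : MB t l) : MB u l := by
  obtain ⟨v, rfl⟩ := h
  induction l generalizing t v with
  | nil => trivial
  | cons p rest ih =>
    obtain ⟨j, hp, hm'⟩ := hm
    by_cases hj : j ≤ t.length
    · refine ⟨j, ?_, ?_⟩
      · rw [List.drop_append_of_le_length hj]
        exact hp.trans (List.prefix_append _ _)
      · rw [List.take_append_of_le_length hj]
        exact hm'
    · have hnil : t.drop j = [] := List.drop_eq_nil_of_le (by omega)
      have hpnil : p.toList = [] := List.prefix_nil.mp (hnil ▸ hp)
      refine ⟨t.length, by simp [hpnil], ?_⟩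
      rw [List.take_left]
      have : t.take j = t := List.take_of_length_le (by omega)
      exact this ▸ hm'

-- ===== A-side characterisation =====

theorem goA_iff (parts : List String) (w : String) :
    isUrlBannedGo w parts = true ↔ MatchP w.toList parts := by
  induction parts generalizing w with
  | nil => simp [isUrlBannedGo, MatchP]
  | cons p rest ih =>
    rw [isUrlBannedGo]
    by_cases hf : PySem.Str.find w p = -1
    · simp only [hf]
      constructor
      · intro h; simp at h
      · rintro ⟨i, hp, -⟩
        have hin : PySem.Chars.isIn p.toList w.toList = true :=
          (PySem.Chars.exists_prefix_drop_iff_isIn p.toList w.toList).mp ⟨i, hp⟩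
        have hne : PySem.Chars.find w.toList p.toList ≠ -1 :=
          (PySem.Chars.find_ne_neg_one_iff _ _).mpr ((PySem.Chars.isIn_iff_infix _ _).mp hin)
        simp at hf
        exact absurd hf hne
    · rw [if_neg hf]
      have hfe : PySem.Str.find w p = PySem.Chars.find w.toList p.toList := by simp
      have hnn : 0 ≤ PySem.Chars.find w.toList p.toList := by
        have := PySem.Chars.neg_one_le_find (s := w.toList) (sub := p.toList)
        rw [hfe] at hf; omega
      have hspec := PySem.Chars.find_spec (s := w.toList) (sub := p.toList) hnn
      set f := (PySem.Chars.find w.toList p.toList).toNat with hfdef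
      have hsl : (PySem.Str.slice w (some (PySem.Str.find w p + (PySem.Str.len p : Int))) none).toList
          = w.toList.drop (f + p.toList.length) := by
        have h1 : (PySem.Str.slice w (some (PySem.Str.find w p + (PySem.Str.len p : Int))) none).toList
            = PySem.List.slice w.toList (some (PySem.Str.find w p + (PySem.Str.len p : Int))) none := by
          simp [PySem.Str.toList_slice]
        have hlen : (PySem.Str.len p : Int) = (p.toList.length : Int) := by simp
        rw [h1, hfe, hlen, PySem.List.slice_from _ (by omega)]
        congr 1
        omega
      rw [ih, hsl]
      constructor
      · intro h
        exact ⟨f, hspec.1, h⟩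
      · rintro ⟨i, hp, hm⟩
        have hfi : f ≤ i := by
          by_contra hlt
          exact hspec.2 i (by omega) hp
        exact matchP_drop_le (by omega) hm

-- ===== rfind characterisation =====

theorem rgo_zero (s sub : List Char) :
    PySem.Chars.rfind.go s sub 0 = if sub.isPrefixOf s then 0 else -1 := by
  rw [PySem.Chars.rfind.go]

theorem rgo_succ (s sub : List Char) (j : Nat) :
    PySem.Chars.rfind.go s sub (j + 1) =
      if sub.isPrefixOf (s.drop (j + 1)) then ((j : Int) + 1) else PySem.Chars.rfind.go s sub j := by
  rw [PySem.Chars.rfind.go]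
  norm_num

theorem rgo_cases (s sub : List Char) (k : Nat) :
    (PySem.Chars.rfind.go s sub k = -1 ∧ ∀ j ≤ k, ¬ sub <+: s.drop j) ∨
    (0 ≤ PySem.Chars.rfind.go s sub k ∧ (PySem.Chars.rfind.go s sub k).toNat ≤ k ∧
      sub <+: s.drop (PySem.Chars.rfind.go s sub k).toNat ∧
      ∀ j ≤ k, (PySem.Chars.rfind.go s sub k).toNat < j → ¬ sub <+: s.drop j) := by
  induction k with
  | zero =>
    rw [rgo_zero]
    by_cases h : sub.isPrefixOf s
    · right
      rw [if_pos h]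
      refine ⟨le_refl _, by simp, by simpa using List.isPrefixOf_iff_prefix.mp h, ?_⟩
      intro j hj h0 _; omega
    · left
      rw [if_neg h]
      refine ⟨rfl, ?_⟩
      intro j hj hp
      interval_cases j
      exact h (List.isPrefixOf_iff_prefix.mpr (by simpa using hp))
  | succ k ih =>
    rw [rgo_succ]
    by_cases h : sub.isPrefixOf (s.drop (k + 1))
    · right
      rw [if_pos h]
      refine ⟨by omega, by simp, ?_, ?_⟩
      · have : ((k : Int) + 1).toNat = k + 1 := by omega
        rw [this]; exact List.isPrefixOf_iff_prefix.mp h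
      · intro j hj hlt
        have : ((k : Int) + 1).toNat = k + 1 := by omega
        omega
    · rw [if_neg h]
      have hnotp : ¬ sub <+: s.drop (k + 1) := fun hp => h (List.isPrefixOf_iff_prefix.mpr hp)
      rcases ih with ⟨heq, hall⟩ | ⟨hnn, hle, hp, hmax⟩
      · left
        refine ⟨heq, ?_⟩
        intro j hj
        rcases Nat.lt_or_ge j (k + 1) with hlt | hge
        · exact hall j (by omega)
        · have : j = k + 1 := by omega
          rw [this]; exact hnotp
      · right
        refine ⟨hnn, by omega, hp, ?_⟩
        intro j hj hlt
        rcases Nat.lt_or_ge j (k + 1) with hlt' | hge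
        · exact hmax j (by omega) hlt
        · have : j = k + 1 := by omega
          rw [this]; exact hnotp

theorem rfindFrom_zero_some (s sub : List Char) (e : Int) (h0 : 0 ≤ e) (hle : e ≤ (s.length : Int)) :
    PySem.Chars.rfindFrom s sub 0 (some e) = PySem.Chars.rfind (s.take e.toNat) sub := by
  unfold PySem.Chars.rfindFrom
  have h1 : ¬ ((s.length : Int) < e) := by omega
  have h2 : ¬ (e < 0) := by omega
  have h4 : ¬ ((0:Int) < 0) := by omega
  simp only [if_neg h1, if_neg h2, if_neg h4, Int.toNat_zero, List.drop_zero, zero_add]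
  by_cases hr : PySem.Chars.rfind (s.take e.toNat) sub = -1
  · simp [hr]
  · simp [hr]

-- ===== B-side characterisation =====

theorem goB_iff (link : String) (parts : List String) (e : Int)
    (h0 : 0 ≤ e) (hle : e ≤ (link.toList.length : Int)) :
    isUrlBannedAltGo link parts e = true ↔ MB (link.toList.take e.toNat) parts := by
  induction parts generalizing e with
  | nil => simp [isUrlBannedAltGo, MB]
  | cons p rest ih =>
    rw [isUrlBannedAltGo]
    set t := link.toList.take e.toNat with ht
    have hjeq : PySem.Str.rfindFrom link p 0 (some e) = PySem.Chars.rfind t p.toList := by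
      rw [PySem.Str.rfindFrom_eq, rfindFrom_zero_some _ _ _ h0 hle]
    have htlen : t.length = e.toNat := by
      rw [ht, List.length_take]; omega
    have hcases := rgo_cases t p.toList t.length
    have hrdef : PySem.Chars.rfind t p.toList = PySem.Chars.rfind.go t p.toList t.length := rfl
    rcases hcases with ⟨heq, hall⟩ | ⟨hnn, hlek, hp, hmax⟩
    · rw [hjeq, hrdef, heq]
      constructor
      · intro h; cases h
      · rintro ⟨j, hpj, -⟩
        by_cases hjle : j ≤ t.length
        · exact absurd hpj (hall j hjle)
        · have hnil : t.drop j = [] := List.drop_eq_nil_of_le (by omega)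
          have hpnil : p.toList = [] := List.prefix_nil.mp (hnil ▸ hpj)
          exact absurd (by simp [hpnil]) (hall t.length (le_refl _))
    · rw [hjeq, hrdef]
      set r := PySem.Chars.rfind.go t p.toList t.length with hr
      have hne : ¬ (r = -1) := by omega
      rw [if_neg hne]
      have hrle : r.toNat ≤ e.toNat := by omega
      have ih' := ih r (by omega) (by omega)
      have hmin : min r.toNat e.toNat = r.toNat := by omega
      have htake : link.toList.take r.toNat = t.take r.toNat := by
        rw [ht, List.take_take, hmin]
      rw [ih', htake]
      constructor
      · intro hmb
        exact ⟨r.toNat, hp, hmb⟩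
      · rintro ⟨j, hpj, hmb⟩
        by_cases hjle : j ≤ t.length
        · have hjr : j ≤ r.toNat := by
            by_contra hgt
            exact hmax j hjle (by omega) hpj
          refine mb_mono rest (List.prefix_take_iff.mpr ⟨List.take_prefix _ _, ?_⟩) hmb
          simp only [List.length_take]
          omega
        · -- j beyond t: p must be empty, so the rightmost (empty) match sits at t.length
          have hnil : t.drop j = [] := List.drop_eq_nil_of_le (by omega)
          have hpnil : p.toList = [] := List.prefix_nil.mp (hnil ▸ hpj)
          have hrt : r.toNat = t.length := by
            by_contra hne'
            exact hmax t.length (le_refl _) (by omega) (by simp [hpnil])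
          have htj : t.take j = t := List.take_of_length_le (by omega)
          rw [hrt, List.take_length]
          rw [htj] at hmb
          exact hmb

-- ===== the bridge: leftmost reading ↔ rightmost reading =====

theorem mb_append_singleton (l : List String) (p : String) (s : List Char) :
    MB s (l ++ [p]) ↔ ∃ i : Nat, p.toList <+: s.drop i ∧ MB (s.drop (i + p.toList.length)) l := by
  induction l generalizing s with
  | nil => simp [MB]
  | cons q l' ih =>
    rw [List.cons_append]
    show (∃ j : Nat, q.toList <+: s.drop j ∧ MB (s.take j) (l' ++ [p])) ↔ _
    constructor
    · rintro ⟨j, hq, hm⟩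
      obtain ⟨i, hpi, hm'⟩ := (ih (s.take j)).mp hm
      rw [List.drop_take] at hpi
      obtain ⟨hps, hplen⟩ := List.prefix_take_iff.mp hpi
      by_cases hij : i ≤ j
      · refine ⟨i, hps, ?_⟩
        refine ⟨j - (i + p.toList.length), ?_, ?_⟩
        · rw [List.drop_drop]
          have hj : i + p.toList.length + (j - (i + p.toList.length)) = j := by omega
          rw [hj]; exact hq
        · rw [List.drop_take] at hm'
          exact hm'
      · -- i > j forces p = []; re-seat the empty match at j
        have hpnil : p.toList = [] := List.eq_nil_of_length_eq_zero (by omega)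
        refine ⟨j, by simp [hpnil], ?_⟩
        refine ⟨0, by simpa [hpnil] using hq, ?_⟩
        simp only [hpnil, List.length_nil, Nat.add_zero, List.take_zero]
        -- hm' : MB ((s.take j).drop (i + 0)) l' with (s.take j).drop i = []
        have h1 : (s.take j).drop (i + p.toList.length) = [] := by
          apply List.drop_eq_nil_of_le
          have := List.length_take_le j s
          omega
        rw [h1] at hm'
        exact hm'
    · rintro ⟨i, hpi, j', hq, hm⟩
      refine ⟨i + p.toList.length + j', ?_, ?_⟩
      · rw [List.drop_drop] at hq
        exact hq
      · apply (ih _).mpr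
        refine ⟨i, ?_, ?_⟩
        · rw [List.drop_take]
          refine List.prefix_take_iff.mpr ⟨hpi, by omega⟩
        · rw [List.drop_take]
          have : i + p.toList.length + j' - (i + p.toList.length) = j' := by omega
          rw [this]
          exact hm

theorem matchP_iff_mb_reverse (parts : List String) (s : List Char) :
    MatchP s parts ↔ MB s parts.reverse := by
  induction parts generalizing s with
  | nil => simp [MatchP, MB]
  | cons p rest ih =>
    rw [List.reverse_cons, mb_append_singleton]
    constructor
    · rintro ⟨i, hp, hm⟩; exact ⟨i, hp, (ih _).mp hm⟩
    · rintro ⟨i, hp, hm⟩; exact ⟨i, hp, (ih _).mpr hm⟩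

-- ===== VERDICT (by name: the statement is the Claim_ definition above) =====
theorem isUrlBanned_spec : Claim_equal_isUrlBanned := by
  intro link bannedUrl _
  unfold Spec_isUrlBanned isUrlBanned isUrlBanned_alt
  rw [Bool.eq_iff_iff]
  have hlen : (PySem.Str.len link : Int) = (link.toList.length : Int) := by simp
  rw [goA_iff, hlen, goB_iff link bannedUrl.reverse _ (by omega) (by omega)]
  have : link.toList.take ((link.toList.length : Int)).toNat = link.toList := by
    simp
  rw [this]
  exact matchP_iff_mb_reverse bannedUrl link.toList
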